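-- pv_equiv track=rewrite | github.com/RuijieWu/KIDS | Engine/Preprocess/optc_datapreprocess.py | is_selected_hosts
-- ===== SOURCE A (Python) =====
-- def is_selected_hosts(line):
--     hosts=[
--         'SysClient0201',
--         'SysClient0402',
--         'SysClient0660',
--         'SysClient0501',
--         'SysClient0051',
--         'SysClient0207',
--     ]
--     flag=False
--     for h in hosts:
--         if h in line:
--             flag=True
--             break
--     return flag
-- ===== SOURCE B (Python) =====
-- import re
--
-- _PATTERN = re.compile(r'SysClient0(201|402|660|501|051|207)')
--
-- def is_selected_hosts(line):
--     return bool(_PATTERN.search(line))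
-- ===== Notes on version B (the rewrite author's own statement) =====
-- stated objective: idiomatic
-- what changed: Replaces the explicit loop of six separate substring scans with one precompiled regular expression (common prefix 'SysClient0' plus a suffix alternation) searched in a single pass over the line.
import Mathlib
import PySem

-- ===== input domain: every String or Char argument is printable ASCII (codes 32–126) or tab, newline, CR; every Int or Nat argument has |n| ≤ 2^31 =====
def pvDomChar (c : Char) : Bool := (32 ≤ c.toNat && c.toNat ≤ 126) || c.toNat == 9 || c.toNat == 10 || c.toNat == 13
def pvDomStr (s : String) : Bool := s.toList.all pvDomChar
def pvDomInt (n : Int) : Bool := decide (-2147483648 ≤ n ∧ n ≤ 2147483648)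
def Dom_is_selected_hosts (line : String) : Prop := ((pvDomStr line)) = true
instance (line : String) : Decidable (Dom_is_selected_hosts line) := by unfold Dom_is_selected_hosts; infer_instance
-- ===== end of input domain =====

-- B replaces A's loop of six separate substring scans by one single left-to-right scan
-- matching the alternation SysClient0(201|402|660|501|051|207) (a precompiled regex in Source B); idiomatic, same cost class.

-- ===== PORT A =====
-- the hosts list of A
def aHosts : List String :=
  ["SysClient0201", "SysClient0402", "SysClient0660",
   "SysClient0501", "SysClient0051", "SysClient0207"]

-- A's for-loop with flag and break: first host that is `in line` returns True
def aLoop : List String → String → Bool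
  | [], _ => false
  | h :: rest, line => if PySem.Str.isIn h line then true else aLoop rest line

def is_selected_hosts (line : String) : Bool := aLoop aHosts line

-- ===== PORT B =====
-- the regex SysClient0(201|402|660|501|051|207) as data: common prefix + suffix alternation
def bPrefix : List Char := ['S','y','s','C','l','i','e','n','t','0']
def bSuffixes : List (List Char) :=
  [['2','0','1'], ['4','0','2'], ['6','6','0'], ['5','0','1'], ['0','5','1'], ['2','0','7']]

-- does the pattern match starting exactly at the head of l?
def bMatchAt (l : List Char) : Bool :=
  bPrefix.isPrefixOf l && bSuffixes.any (fun suf => suf.isPrefixOf (l.drop 10))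

-- re.search: try each starting position left to right, one pass over the line
def bScan : List Char → Bool
  | [] => false
  | c :: rest => bMatchAt (c :: rest) || bScan rest

def is_selected_hosts_alt (line : String) : Bool := bScan line.toList

-- ===== PRECONDITION & SPEC =====
def Spec_is_selected_hosts (line : String) (out : Bool) : Prop := out = is_selected_hosts_alt line
instance (line : String) (out : Bool) : Decidable (Spec_is_selected_hosts line out) := by unfold Spec_is_selected_hosts; infer_instance

-- ===== CLAIM (what is proved, stated in full; the proofs are below) =====
def Claim_equal_is_selected_hosts : Prop := ∀ (line : String), Dom_is_selected_hosts line → Spec_is_selected_hosts line (is_selected_hosts line)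

-- ===== LEMMAS AND PROOFS =====

theorem aLoop_iff (hs : List String) (line : String) :
    aLoop hs line = true ↔ ∃ h ∈ hs, PySem.Str.isIn h line = true := by
  induction hs with
  | nil => simp [aLoop]
  | cons h rest ih =>
    simp only [aLoop, List.mem_cons]
    split_ifs with hin
    · exact ⟨fun _ => ⟨h, Or.inl rfl, hin⟩, fun _ => rfl⟩
    · rw [ih]
      constructor
      · rintro ⟨g, hg, hgin⟩; exact ⟨g, Or.inr hg, hgin⟩
      · rintro ⟨g, rfl | hg, hgin⟩
        · exact absurd hgin hin
        · exact ⟨g, hg, hgin⟩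

theorem prefix_append_iff (a b l : List Char) :
    (a ++ b) <+: l ↔ a <+: l ∧ b <+: l.drop a.length := by
  constructor
  · rintro ⟨t, rfl⟩
    refine ⟨⟨b ++ t, by simp⟩, ?_⟩
    rw [List.append_assoc, List.drop_left]
    exact ⟨t, rfl⟩
  · rintro ⟨⟨u, rfl⟩, hb⟩
    rw [List.drop_left] at hb
    obtain ⟨t, rfl⟩ := hb
    exact ⟨t, by simp⟩

theorem bMatchAt_iff (l : List Char) :
    bMatchAt l = true ↔ ∃ suf ∈ bSuffixes, (bPrefix ++ suf) <+: l := by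
  simp only [bMatchAt, Bool.and_eq_true, List.any_eq_true, List.isPrefixOf_iff_prefix]
  have hlen : List.drop bPrefix.length l = List.drop 10 l := rfl
  constructor
  · rintro ⟨hp, suf, hmem, hs⟩
    refine ⟨suf, hmem, (prefix_append_iff _ _ _).2 ⟨hp, ?_⟩⟩
    rw [hlen]; exact hs
  · rintro ⟨suf, hmem, h⟩
    obtain ⟨hp, hs⟩ := (prefix_append_iff _ _ _).1 h
    rw [hlen] at hs
    exact ⟨hp, suf, hmem, hs⟩

theorem bScan_iff (l : List Char) :
    bScan l = true ↔ ∃ j, bMatchAt (l.drop j) = true := by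
  induction l with
  | nil =>
    simp only [bScan]
    constructor
    · intro h; exact absurd h (by decide)
    · rintro ⟨j, hj⟩
      simp only [List.drop_nil] at hj
      exact absurd hj (by decide)
  | cons c rest ih =>
    simp only [bScan, Bool.or_eq_true, ih]
    constructor
    · rintro (h | ⟨j, hj⟩)
      · exact ⟨0, h⟩
      · exact ⟨j + 1, hj⟩
    · rintro ⟨j, hj⟩
      cases j with
      | zero => exact Or.inl hj
      | succ j => exact Or.inr ⟨j, hj⟩

theorem both_iff (line : String) :
    is_selected_hosts line = true ↔ is_selected_hosts_alt line = true := by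
  rw [is_selected_hosts, aLoop_iff]
  rw [is_selected_hosts_alt, bScan_iff]
  have h2 : (∃ j, bMatchAt (line.toList.drop j) = true) ↔
      ∃ suf ∈ bSuffixes, PySem.Chars.isIn (bPrefix ++ suf) line.toList = true := by
    constructor
    · rintro ⟨j, hj⟩
      obtain ⟨suf, hmem, hp⟩ := (bMatchAt_iff _).1 hj
      exact ⟨suf, hmem, (PySem.Chars.exists_prefix_drop_iff_isIn _ _).1 ⟨j, hp⟩⟩
    · rintro ⟨suf, hmem, hin⟩
      obtain ⟨j, hp⟩ := (PySem.Chars.exists_prefix_drop_iff_isIn _ _).2 hin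
      exact ⟨j, (bMatchAt_iff _).2 ⟨suf, hmem, hp⟩⟩
  rw [h2]
  simp only [aHosts, bSuffixes, List.mem_cons, List.not_mem_nil, or_false]
  constructor
  · rintro ⟨h, hmem, hin⟩
    simp only [PySem.Str.isIn_eq] at hin
    rcases hmem with rfl | rfl | rfl | rfl | rfl | rfl
    · exact ⟨['2','0','1'], by simp, hin⟩
    · exact ⟨['4','0','2'], by simp, hin⟩
    · exact ⟨['6','6','0'], by simp, hin⟩
    · exact ⟨['5','0','1'], by simp, hin⟩
    · exact ⟨['0','5','1'], by simp, hin⟩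
    · exact ⟨['2','0','7'], by simp, hin⟩
  · rintro ⟨suf, hmem, hin⟩
    rcases hmem with rfl | rfl | rfl | rfl | rfl | rfl
    · exact ⟨"SysClient0201", by simp, by simpa [PySem.Str.isIn_eq] using hin⟩
    · exact ⟨"SysClient0402", by simp, by simpa [PySem.Str.isIn_eq] using hin⟩
    · exact ⟨"SysClient0660", by simp, by simpa [PySem.Str.isIn_eq] using hin⟩
    · exact ⟨"SysClient0501", by simp, by simpa [PySem.Str.isIn_eq] using hin⟩
    · exact ⟨"SysClient0051", by simp, by simpa [PySem.Str.isIn_eq] using hin⟩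
    · exact ⟨"SysClient0207", by simp, by simpa [PySem.Str.isIn_eq] using hin⟩

-- ===== VERDICT (by name: the statement is the Claim_ definition above) =====
theorem is_selected_hosts_spec : Claim_equal_is_selected_hosts := by
  intro line _
  unfold Spec_is_selected_hosts
  have := both_iff line
  cases h1 : is_selected_hosts line <;> cases h2 : is_selected_hosts_alt line <;>
    simp_all
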